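-- pv_equiv track=rewrite | github.com/GonzaloTQ/python | practico.py | longitud_mas_grande
-- ===== SOURCE A (Python) =====
-- def longitud_mas_grande(A: list[list[int]]) -> int:
--     copia: list[list[int]] = A.copy()
--     contador:int = 0
--     indice:int=0
--     for i in copia:
--
--         if contador < contador_lista(i):
--             contador = contador_lista(i)
--         if contador >= contador_lista(i):
--             contador = contador
--     return contador
--
-- def contador_lista (a:list[int]) -> int:
--     contador : int = 0
--     contadorAux: int = 0
--     indice: int = 0
--     for i in a:
--         if i == 1:
--             contador += 1
--         if i != 1:
--             if contadorAux < contador: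
--                 contadorAux = contador
--             contador = 0
--         if contadorAux < contador:
--             contadorAux = contador
--
--     return contadorAux
-- ===== SOURCE B (Python) =====
-- def longitud_mas_grande(A: list[list[int]]) -> int:
--     best = 0
--     for fila in A:
--         r = max_run_ones(fila)
--         if r > best:
--             best = r
--     return best
--
-- def max_run_ones(xs: list[int]) -> int:
--     # longest run of 1s: length of the leading run vs best of the tail after it
--     if not xs:
--         return 0
--     k = 0
--     while k < len(xs) and xs[k] == 1:
--         k += 1
--     return max(k, max_run_ones(xs[k + 1:]))
-- ===== Notes on version B (the rewrite author's own statement) =====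
-- stated objective: simpler
-- what changed: Replaces the two-counter state machine (current run + best-so-far, with redundant duplicated guards) by a run-decomposition recursion: take the leading run of 1s, recurse on the rest after the separator, combine with max.
import Mathlib
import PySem

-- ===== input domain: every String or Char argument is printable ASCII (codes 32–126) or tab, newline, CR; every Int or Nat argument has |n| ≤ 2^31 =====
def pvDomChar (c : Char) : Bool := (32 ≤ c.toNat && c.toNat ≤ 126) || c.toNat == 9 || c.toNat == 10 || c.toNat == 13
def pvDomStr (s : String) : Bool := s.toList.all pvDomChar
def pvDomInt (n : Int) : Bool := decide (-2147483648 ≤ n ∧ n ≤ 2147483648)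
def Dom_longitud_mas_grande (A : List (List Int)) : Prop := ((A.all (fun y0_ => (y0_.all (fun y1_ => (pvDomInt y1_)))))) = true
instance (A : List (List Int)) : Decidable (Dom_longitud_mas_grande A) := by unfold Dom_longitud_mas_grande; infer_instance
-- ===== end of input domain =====

-- B replaces A's two-counter state machine by a run-decomposition recursion (simpler).

-- ===== PORT A =====
def contador_lista (a : List Int) : Int :=
  (a.foldl
    (fun (st : Int × Int) (i : Int) =>
      let contador := st.1
      let contadorAux := st.2
      let contador := if i == 1 then contador + 1 else contador
      let st2 : Int × Int :=
        if i != 1 then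
          (0, if contadorAux < contador then contador else contadorAux)
        else (contador, contadorAux)
      let contador := st2.1
      let contadorAux := st2.2
      let contadorAux := if contadorAux < contador then contador else contadorAux
      (contador, contadorAux))
    (0, 0)).2

def longitud_mas_grande (A : List (List Int)) : Int :=
  let copia := A
  copia.foldl
    (fun (contador : Int) (i : List Int) =>
      let contador := if contador < contador_lista i then contador_lista i else contador
      let contador := if contador ≥ contador_lista i then contador else contador
      contador)
    0

-- ===== PORT B =====
def max_run_ones : List Int → Int
  | [] => 0
  | x :: rest =>
    let k := ((x :: rest).takeWhile (fun y => y == 1)).length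
    max (k : Int) (max_run_ones ((x :: rest).drop (k + 1)))
termination_by xs => xs.length
decreasing_by
  simp only [List.length_drop, List.length_cons]
  omega

def longitud_mas_grande_alt (A : List (List Int)) : Int :=
  A.foldl
    (fun (best : Int) (fila : List Int) =>
      let r := max_run_ones fila
      if r > best then r else best)
    0

-- ===== PRECONDITION & SPEC =====
def Spec_longitud_mas_grande (A : List (List Int)) (out : Int) : Prop := out = longitud_mas_grande_alt A
instance (A : List (List Int)) (out : Int) : Decidable (Spec_longitud_mas_grande A out) := by unfold Spec_longitud_mas_grande; infer_instance

-- ===== CLAIM (what is proved, stated in full; the proofs are below) =====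
def Claim_equal_longitud_mas_grande : Prop := ∀ (A : List (List Int)), Dom_longitud_mas_grande A → Spec_longitud_mas_grande A (longitud_mas_grande A)

-- ===== LEMMAS AND PROOFS =====

theorem max_run_ones_nil : max_run_ones [] = (0:Int) := by
  unfold max_run_ones; rfl

theorem max_run_ones_cons (x : Int) (xs : List Int) : max_run_ones (x :: xs) =
    max (((x :: xs).takeWhile (fun y => y == 1)).length : Int)
      (max_run_ones ((x :: xs).drop (((x :: xs).takeWhile (fun y => y == 1)).length + 1))) := by
  rw [max_run_ones.eq_def]

-- reference function: max run of ones, carrying the current-run length c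
def mrC (c : Int) : List Int → Int
  | [] => c
  | x :: xs => if x = 1 then mrC (c + 1) xs else max c (mrC 0 xs)

theorem mrC_ge (c : Int) (xs : List Int) : c ≤ mrC c xs := by
  induction xs generalizing c with
  | nil => simp [mrC]
  | cons x xs ih =>
    simp only [mrC]
    split_ifs with h
    · have := ih (c + 1); omega
    · exact le_max_left _ _

-- A's inner loop equals max m (mrC c ·) under the invariant 0 ≤ c ≤ m
theorem foldl_eq_mrC (xs : List Int) : ∀ (c m : Int), 0 ≤ c → c ≤ m →
    (xs.foldl
      (fun (st : Int × Int) (i : Int) =>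
        let contador := st.1
        let contadorAux := st.2
        let contador := if i == 1 then contador + 1 else contador
        let st2 : Int × Int :=
          if i != 1 then
            (0, if contadorAux < contador then contador else contadorAux)
          else (contador, contadorAux)
        let contador := st2.1
        let contadorAux := st2.2
        let contadorAux := if contadorAux < contador then contador else contadorAux
        (contador, contadorAux))
      (c, m)).2 = max m (mrC c xs) := by
  induction xs with
  | nil => intro c m hc hm; simp [mrC]; omega
  | cons x xs ih =>
    intro c m hc hm
    by_cases hx : x = 1
    · subst hx
      simp only [List.foldl_cons, mrC]
      have h1 : ((1 : Int) == 1) = true := by decide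
      have h2 : ((1 : Int) != 1) = false := by decide
      simp only [h1, h2, if_true, Bool.false_eq_true, if_false]
      have : (if m < c + 1 then c + 1 else m) = max m (c + 1) := by omega
      rw [this, ih (c + 1) (max m (c + 1)) (by omega) (by omega)]
      have := mrC_ge (c + 1) xs
      omega
    · have h1 : ((x : Int) == 1) = false := by simp [hx]
      have h2 : ((x : Int) != 1) = true := by simp [hx]
      simp only [List.foldl_cons, mrC, if_neg hx, h1, h2, Bool.false_eq_true, if_false, if_true]
      have hmx : (if m < c then c else m) = m := by omega
      simp only [hmx]
      have : (if m < (0:Int) then (0:Int) else m) = m := by omega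
      simp only [this]
      rw [ih 0 m le_rfl (by omega)]
      omega

theorem contador_lista_eq_mrC (xs : List Int) : contador_lista xs = mrC 0 xs := by
  unfold contador_lista
  rw [foldl_eq_mrC xs 0 0 le_rfl le_rfl]
  have := mrC_ge 0 xs
  omega

-- mrC in terms of the leading run of ones
theorem mrC_run (xs : List Int) : ∀ (c : Int), 0 ≤ c →
    mrC c xs = max (c + ((xs.takeWhile (fun y => y == 1)).length : Int))
      (max_run_ones (xs.drop ((xs.takeWhile (fun y => y == 1)).length + 1))) := by
  induction xs with
  | nil => intro c hc; simp [mrC, max_run_ones_nil]; omega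
  | cons x xs ih =>
    intro c hc
    by_cases hx : x = 1
    · subst hx
      have ht : ((1:Int) :: xs).takeWhile (fun y => y == 1) = 1 :: xs.takeWhile (fun y => y == 1) := by
        simp
      simp only [mrC, ht, List.length_cons]
      rw [ih (c + 1) (by omega)]
      have hd : ((1:Int) :: xs).drop ((xs.takeWhile (fun y => y == 1)).length + 1 + 1)
          = xs.drop ((xs.takeWhile (fun y => y == 1)).length + 1) := by
        simp [List.drop]
      rw [hd]
      push_cast
      omega
    · have ht : (x :: xs).takeWhile (fun y => y == 1) = [] := by
        simp [hx]
      simp only [mrC, if_neg hx, ht, List.length_nil]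
      have hd : (x :: xs).drop (0 + 1) = xs := by simp
      rw [hd]
      have : max_run_ones xs = mrC 0 xs := by
        cases xs with
        | nil => simp [max_run_ones_nil, mrC]
        | cons y ys =>
          rw [max_run_ones_cons, ih 0 le_rfl]
          omega
      rw [this]
      push_cast; omega

theorem contador_lista_eq_max_run_ones (xs : List Int) : contador_lista xs = max_run_ones xs := by
  rw [contador_lista_eq_mrC]
  cases xs with
  | nil => simp [mrC, max_run_ones_nil]
  | cons x xs =>
    rw [mrC_run _ 0 le_rfl, max_run_ones_cons]
    omega

theorem foldl_outer_eq (A : List (List Int)) : ∀ (c : Int),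
    (A.foldl
      (fun (contador : Int) (i : List Int) =>
        let contador := if contador < contador_lista i then contador_lista i else contador
        let contador := if contador ≥ contador_lista i then contador else contador
        contador) c)
    = (A.foldl
      (fun (best : Int) (fila : List Int) =>
        let r := max_run_ones fila
        if r > best then r else best) c) := by
  induction A with
  | nil => intro c; rfl
  | cons row rows ih =>
    intro c
    simp only [List.foldl_cons]
    rw [← ih]
    congr 1
    rw [contador_lista_eq_max_run_ones]
    by_cases h : c < max_run_ones row
    · simp only [gt_iff_lt, if_pos h]
      simp
    · simp only [gt_iff_lt, if_neg h]
      have : c ≥ max_run_ones row := by omega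
      simp [this]

-- ===== VERDICT (by name: the statement is the Claim_ definition above) =====
theorem longitud_mas_grande_spec : Claim_equal_longitud_mas_grande := by
  intro A _
  unfold Spec_longitud_mas_grande longitud_mas_grande longitud_mas_grande_alt
  exact foldl_outer_eq A 0
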